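-- pv_equiv track=rewrite | github.com/han-gaeul/TIL | Programmers/기초/코드처리하기.py | solution
-- ===== SOURCE A (Python) =====
-- def solution(code):
--     ret = ''
--     mode = 0
--     for idx in range(len(code)):
--         if code[idx] == '1':
--             mode = 1 - mode # 모드 변경
--         elif mode == 0:
--             if idx % 2 == 0:
--                 ret += code[idx]
--         else:
--             if idx % 2 == 1:
--                 ret += code[idx]
--     if ret == '':
--         return 'EMPTY'
--     return ret
-- ===== SOURCE B (Python) =====
-- def solution(code):
--     # Segment view: splitting on the toggle character '1' yields segments; the
--     # j-th segment is processed entirely in mode j % 2, so each segment's kept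
--     # characters are just those whose global index parity equals j % 2.
--     pieces = []
--     pos = 0
--     for mode, seg in enumerate(code.split('1')):
--         pieces.append(''.join(c for i, c in enumerate(seg, pos) if i % 2 == mode % 2))
--         pos += len(seg) + 1
--     s = ''.join(pieces)
--     return s if s else 'EMPTY'
-- ===== Notes on version B (the rewrite author's own statement) =====
-- stated objective: alternative
-- what changed: Replaces A's single stateful scan with a toggling mode bit by a segment decomposition: split the string on the toggle character '1', process segment j wholly in mode j % 2, selecting its characters by global-index parity, and join the pieces.
import Mathlib
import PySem

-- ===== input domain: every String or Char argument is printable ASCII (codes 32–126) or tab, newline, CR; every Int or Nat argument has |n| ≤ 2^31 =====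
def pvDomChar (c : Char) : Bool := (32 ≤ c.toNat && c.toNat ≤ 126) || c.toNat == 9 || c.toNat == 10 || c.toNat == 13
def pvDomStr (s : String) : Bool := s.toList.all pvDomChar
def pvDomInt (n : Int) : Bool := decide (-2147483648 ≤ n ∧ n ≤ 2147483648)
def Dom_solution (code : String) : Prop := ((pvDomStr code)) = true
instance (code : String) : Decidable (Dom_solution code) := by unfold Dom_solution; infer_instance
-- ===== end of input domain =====

-- B replaces A's stateful toggling scan by a segment decomposition (split on '1', per-segment parity slice); alternative algorithm, same asymptotic cost.

-- ===== PORT A =====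
def solution (code : String) : String :=
  let cs := code.toList
  let fin := (PySem.List.pyRange 0 (cs.length : Int) 1).foldl
    (fun (st : List Char × Int) idx =>
      if PySem.List.pyGetD cs idx ' ' = '1' then (st.1, 1 - st.2)
      else if st.2 = 0 then
        (if PySem.Int.mod idx 2 = 0 then st.1 ++ [PySem.List.pyGetD cs idx ' '] else st.1, st.2)
      else
        (if PySem.Int.mod idx 2 = 1 then st.1 ++ [PySem.List.pyGetD cs idx ' '] else st.1, st.2))
    ([], 0)
  if fin.1 = [] then "EMPTY" else String.mk fin.1

-- ===== PORT B =====
-- the genexp ''.join(c for i, c in enumerate(seg, pos) if i % 2 == mode % 2)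
def pickSeg (seg : List Char) (pos mode : Int) : List Char :=
  (PySem.List.enumerate seg pos).filterMap
    (fun q => if PySem.Int.mod q.1 2 = PySem.Int.mod mode 2 then some q.2 else none)

def solution_alt (code : String) : String :=
  let parts := PySem.Chars.splitOn code.toList ['1']
  let fin := (PySem.List.enumerate parts 0).foldl
    (fun (st : List (List Char) × Int) ms =>
      (st.1 ++ [pickSeg ms.2 st.2 ms.1], st.2 + ms.2.length + 1))
    ([], 0)
  let s := fin.1.flatten
  if s = [] then "EMPTY" else String.mk s

-- ===== PRECONDITION & SPEC =====
def Spec_solution (code : String) (out : String) : Prop := out = solution_alt code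
instance (code : String) (out : String) : Decidable (Spec_solution code out) := by unfold Spec_solution; infer_instance

-- ===== CLAIM (what is proved, stated in full; the proofs are below) =====
def Claim_equal_solution : Prop := ∀ (code : String), Dom_solution code → Spec_solution code (solution code)

-- ===== LEMMAS AND PROOFS =====

-- canonical selection, structural in the remaining suffix; s = current index, k = '1's seen so far
def selAux : List Char → Nat → Nat → List Char
  | [], _, _ => []
  | c :: cs, s, k =>
    if c = '1' then selAux cs (s+1) (k+1)
    else if s % 2 = k % 2 then c :: selAux cs (s+1) k
    else selAux cs (s+1) k

-- structural single-char split on '1' (Python split('1'))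
def split1 : List Char → List (List Char)
  | [] => [[]]
  | c :: cs => if c = '1' then [] :: split1 cs
               else match split1 cs with
                    | [] => [[c]]
                    | s0 :: rest => (c :: s0) :: rest

def consHead (p : List Char) : List (List Char) → List (List Char)
  | [] => [p]
  | x :: xs => (p ++ x) :: xs

-- B's segment processing, structural in the segment list
def procSegs : List (List Char) → Int → Int → List Char
  | [], _, _ => []
  | seg :: rest, pos, mode => pickSeg seg pos mode ++ procSegs rest (pos + seg.length + 1) (mode + 1)

theorem mod_cast_two (a : Nat) : PySem.Int.mod (a : Int) 2 = ((a % 2 : Nat) : Int) := by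
  exact_mod_cast PySem.Int.mod_natCast a 2

theorem mode_flip (k : Nat) : (1 : Int) - ((k % 2 : Nat) : Int) = (((k+1) % 2 : Nat) : Int) := by
  omega

theorem split1_ne_nil (l : List Char) : split1 l ≠ [] := by
  cases l with
  | nil => simp [split1]
  | cons c cs =>
    simp only [split1]
    split_ifs
    · simp
    · cases h : split1 cs <;> simp

theorem consHead_append (p : List Char) (c : Char) (ps : List (List Char)) :
    consHead (p ++ [c]) ps = consHead p (consHead [c] ps) := by
  cases ps <;> simp [consHead]

theorem consHead_nil_of_ne (ps : List (List Char)) (h : ps ≠ []) : consHead [] ps = ps := by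
  cases ps with
  | nil => exact absurd rfl h
  | cons x xs => simp [consHead]

theorem splitOn_go_eq (fuel : Nat) : ∀ (l cur : List Char) (acc : List (List Char)),
    l.length ≤ fuel →
    PySem.Chars.splitOn.go ['1'] fuel l cur acc
      = acc.reverse ++ consHead cur.reverse (split1 l) := by
  induction fuel with
  | zero =>
    intro l cur acc h
    have hl : l = [] := List.eq_nil_of_length_eq_zero (by omega)
    subst hl
    simp [PySem.Chars.splitOn.go, split1, consHead]
  | succ fuel ih =>
    intro l cur acc h
    cases l with
    | nil => simp [PySem.Chars.splitOn.go, split1, consHead]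
    | cons c rest =>
      have hlen : rest.length ≤ fuel := by simp at h; omega
      rw [PySem.Chars.splitOn.go]
      by_cases hc : c = '1'
      · subst hc
        have hpre : List.isPrefixOf ['1'] ('1' :: rest) = true := by
          simp [List.isPrefixOf]
        simp only [hpre, if_true, List.length_cons, List.length_nil, List.drop_succ_cons,
          List.drop_zero]
        rw [ih rest [] _ hlen, show ([] : List Char).reverse = [] from rfl,
            consHead_nil_of_ne _ (split1_ne_nil rest)]
        obtain ⟨s0, r, hs⟩ : ∃ s0 r, split1 rest = s0 :: r := by
          cases hsp : split1 rest with
          | nil => exact absurd hsp (split1_ne_nil rest)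
          | cons a b => exact ⟨a, b, rfl⟩
        simp [split1, hs, consHead]
      · have hpre : List.isPrefixOf ['1'] (c :: rest) = false := by
          simp [List.isPrefixOf]
          exact fun h' => hc h'.symm
        simp only [hpre, Bool.false_eq_true, if_false]
        rw [ih rest (c :: cur) acc hlen]
        simp only [List.reverse_cons, consHead_append]
        congr 1
        congr 1
        obtain ⟨s0, r, hs⟩ : ∃ s0 r, split1 rest = s0 :: r := by
          cases hsp : split1 rest with
          | nil => exact absurd hsp (split1_ne_nil rest)
          | cons a b => exact ⟨a, b, rfl⟩
        simp [split1, hc, hs, consHead]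

theorem splitOn_eq_split1 (l : List Char) :
    PySem.Chars.splitOn l ['1'] = split1 l := by
  show PySem.Chars.splitOn.go ['1'] (l.length + 1) l [] [] = split1 l
  rw [splitOn_go_eq (l.length + 1) l [] [] (by omega)]
  simp [consHead_nil_of_ne _ (split1_ne_nil l)]

theorem pickSeg_nil (pos mode : Int) : pickSeg [] pos mode = [] := by
  simp [pickSeg, PySem.List.enumerate_nil]

theorem pickSeg_cons (c : Char) (seg : List Char) (pos mode : Int) :
    pickSeg (c :: seg) pos mode
      = (if PySem.Int.mod pos 2 = PySem.Int.mod mode 2 then [c] else [])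
        ++ pickSeg seg (pos + 1) mode := by
  simp only [pickSeg, PySem.List.enumerate_cons, List.filterMap_cons]
  split_ifs <;> simp

-- B's fold over enumerated parts, flattened, equals procSegs
theorem B_fold (parts : List (List Char)) : ∀ (acc : List (List Char)) (pos m : Int),
    ((PySem.List.enumerate parts m).foldl
      (fun (st : List (List Char) × Int) ms =>
        (st.1 ++ [pickSeg ms.2 st.2 ms.1], st.2 + ms.2.length + 1))
      (acc, pos)).1.flatten
    = acc.flatten ++ procSegs parts pos m := by
  induction parts with
  | nil => intro acc pos m; simp [PySem.List.enumerate_nil, procSegs]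
  | cons seg rest ih =>
    intro acc pos m
    simp only [PySem.List.enumerate_cons, List.foldl_cons]
    rw [ih]
    simp [procSegs]

-- segment processing of the split equals the canonical selection
theorem procSegs_split1 (l : List Char) : ∀ (pos k : Nat),
    procSegs (split1 l) (pos : Int) (k : Int) = selAux l pos k := by
  induction l with
  | nil =>
    intro pos k
    simp [split1, procSegs, pickSeg_nil, selAux]
  | cons c cs ih =>
    intro pos k
    by_cases hc : c = '1'
    · simp only [split1, procSegs, pickSeg_nil, List.nil_append, List.length_nil,
        Nat.cast_zero, selAux, if_pos hc]
      rw [show ((pos : Int) + 0 + 1) = ((pos + 1 : Nat) : Int) by push_cast; ring,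
          show ((k : Int) + 1) = ((k + 1 : Nat) : Int) by push_cast; ring]
      exact ih (pos + 1) (k + 1)
    · obtain ⟨s0, rest, hs⟩ : ∃ s0 rest, split1 cs = s0 :: rest := by
        cases h : split1 cs with
        | nil => exact absurd h (split1_ne_nil cs)
        | cons a b => exact ⟨a, b, rfl⟩
      simp only [split1, if_neg hc, hs, procSegs, pickSeg_cons]
      have ihcs := ih (pos + 1) k
      rw [hs] at ihcs
      simp only [procSegs] at ihcs
      push_cast at ihcs
      have elen : ((pos : Int) + ((c :: s0).length : Int) + 1)
          = (pos : Int) + 1 + (s0.length : Int) + 1 := by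
        simp [List.length_cons]; ring
      rw [elen]
      have hmod : (PySem.Int.mod (pos : Int) 2 = PySem.Int.mod (k : Int) 2) ↔ pos % 2 = k % 2 := by
        rw [mod_cast_two pos, mod_cast_two k]; exact Nat.cast_inj
      simp only [selAux, if_neg hc]
      by_cases hp : pos % 2 = k % 2
      · rw [if_pos (hmod.mpr hp), if_pos hp]
        simp [ihcs]
      · rw [if_neg (fun h => hp (hmod.mp h)), if_neg hp]
        simpa using ihcs

theorem A_aux (full : List Char) : ∀ (n s k : Nat) (ret : List Char),
    full.length = s + n →
    ((PySem.List.pyRange (s : Int) (full.length : Int) 1).foldl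
      (fun (st : List Char × Int) idx =>
        if PySem.List.pyGetD full idx ' ' = '1' then (st.1, 1 - st.2)
        else if st.2 = 0 then
          (if PySem.Int.mod idx 2 = 0 then st.1 ++ [PySem.List.pyGetD full idx ' '] else st.1, st.2)
        else
          (if PySem.Int.mod idx 2 = 1 then st.1 ++ [PySem.List.pyGetD full idx ' '] else st.1, st.2))
      (ret, ((k % 2 : Nat) : Int))).1 = ret ++ selAux (full.drop s) s k := by
  intro n
  induction n with
  | zero =>
    intro s k ret hlen
    rw [PySem.List.pyRange_one_eq_nil (by omega)]
    rw [List.drop_of_length_le (by omega)]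
    simp [selAux]
  | succ n ih =>
    intro s k ret hlen
    have hs : s < full.length := by omega
    rw [PySem.List.pyRange_one_cons (by exact_mod_cast hs)]
    have hdrop : full.drop s = full[s] :: full.drop (s+1) := List.drop_eq_getElem_cons hs
    have hget : PySem.List.pyGetD full (s : Int) ' ' = full[s] := by
      rw [PySem.List.pyGetD_natCast]
      simp [List.getD, hs]
    rw [List.foldl_cons, hdrop]
    by_cases h1 : full[s] = '1'
    · simp only [hget, h1]
      rw [mode_flip k]
      have := ih (s+1) (k+1) ret (by omega)
      push_cast at this ⊢
      rw [this]
      simp [selAux]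
    · simp only [hget, if_neg h1]
      have hmod := mod_cast_two s
      by_cases hk : k % 2 = 0
      · rw [if_pos (by rw [hk]; rfl)]
        by_cases hsp : s % 2 = 0
        · rw [if_pos (by rw [hmod, hsp]; rfl)]
          have := ih (s+1) k (ret ++ [full[s]]) (by omega)
          push_cast at this ⊢
          rw [this]
          simp [selAux, h1, hsp, hk]
        · rw [if_neg (by rw [hmod]; omega)]
          have := ih (s+1) k ret (by omega)
          push_cast at this ⊢
          rw [this]
          simp [selAux, h1, hk]
          omega
      · rw [if_neg (by omega)]
        by_cases hsp : s % 2 = 1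
        · rw [if_pos (by rw [hmod, hsp]; rfl)]
          have := ih (s+1) k (ret ++ [full[s]]) (by omega)
          push_cast at this ⊢
          rw [this]
          have : s % 2 = k % 2 := by omega
          simp [selAux, h1, this]
        · rw [if_neg (by rw [hmod]; omega)]
          have := ih (s+1) k ret (by omega)
          push_cast at this ⊢
          rw [this]
          simp [selAux, h1]
          omega

-- ===== VERDICT (by name: the statement is the Claim_ definition above) =====
theorem solution_spec : Claim_equal_solution := by
  intro code _
  unfold Spec_solution solution solution_alt
  have hA := A_aux code.toList code.toList.length 0 0 [] (by omega)
  have hB := B_fold (split1 code.toList) [] 0 0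
  have hP := procSegs_split1 code.toList 0 0
  simp only [Nat.zero_mod, Nat.cast_zero, List.drop_zero, List.nil_append] at hA hP
  simp only [List.flatten_nil, List.nil_append] at hB
  simp only [splitOn_eq_split1, hA, hB, hP]
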